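-- pv_equiv track=rewrite | github.com/mweber95/Origin_of_Life | oriol/tools/download_and_parser.py | builder
-- ===== SOURCE A (Python) =====
-- def builder(ids, baltimore, definition, length, lineage, mol_type, cds, sequence):
--     json_dict = {}
--     for id in ids:
--         json_dict[id] = {}
--
--     for id in baltimore:
--         for key in json_dict:
--             if id == key:
--                 json_dict[id]["baltimore_group"] = baltimore[id]
--
--     for id in definition:
--         for key in json_dict:
--             if id == key:
--                 json_dict[id]["definition"] = definition[id]
--
--     for id in length:
--         for key in json_dict:
--             if id == key:
--                 json_dict[id]["length"] = length[id]
--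
--     for id in lineage:
--         for key in json_dict:
--             if id == key:
--                 json_dict[id]["lineage"] = lineage[id]
--
--     for id in mol_type:
--         for key in json_dict:
--             if id == key:
--                 json_dict[id]["mol_type"] = mol_type[id]
--
--     for id in cds:
--         for key in json_dict:
--             if id == key:
--                 json_dict[id]["CDS"] = cds[id]
--
--     for id in sequence:
--         for key in json_dict:
--             if id == key:
--                 json_dict[id]["sequence"] = sequence[id]
--
--     return json_dict
-- ===== SOURCE B (Python) =====
-- def builder(ids, baltimore, definition, length, lineage, mol_type, cds, sequence):
--     json_dict = {}
--     for id in ids: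
--         entry = {}
--         if id in baltimore:
--             entry["baltimore_group"] = baltimore[id]
--         if id in definition:
--             entry["definition"] = definition[id]
--         if id in length:
--             entry["length"] = length[id]
--         if id in lineage:
--             entry["lineage"] = lineage[id]
--         if id in mol_type:
--             entry["mol_type"] = mol_type[id]
--         if id in cds:
--             entry["CDS"] = cds[id]
--         if id in sequence:
--             entry["sequence"] = sequence[id]
--         json_dict[id] = entry
--     return json_dict
-- ===== Notes on version B (the rewrite author's own statement) =====
-- stated objective: faster
-- what changed: A makes seven field-wide passes, each rescanning every key of json_dict for every field entry (a quadratic nested scan); B makes one pass over ids and assembles each record completely with direct dict membership tests, in the same field order.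
import Mathlib
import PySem

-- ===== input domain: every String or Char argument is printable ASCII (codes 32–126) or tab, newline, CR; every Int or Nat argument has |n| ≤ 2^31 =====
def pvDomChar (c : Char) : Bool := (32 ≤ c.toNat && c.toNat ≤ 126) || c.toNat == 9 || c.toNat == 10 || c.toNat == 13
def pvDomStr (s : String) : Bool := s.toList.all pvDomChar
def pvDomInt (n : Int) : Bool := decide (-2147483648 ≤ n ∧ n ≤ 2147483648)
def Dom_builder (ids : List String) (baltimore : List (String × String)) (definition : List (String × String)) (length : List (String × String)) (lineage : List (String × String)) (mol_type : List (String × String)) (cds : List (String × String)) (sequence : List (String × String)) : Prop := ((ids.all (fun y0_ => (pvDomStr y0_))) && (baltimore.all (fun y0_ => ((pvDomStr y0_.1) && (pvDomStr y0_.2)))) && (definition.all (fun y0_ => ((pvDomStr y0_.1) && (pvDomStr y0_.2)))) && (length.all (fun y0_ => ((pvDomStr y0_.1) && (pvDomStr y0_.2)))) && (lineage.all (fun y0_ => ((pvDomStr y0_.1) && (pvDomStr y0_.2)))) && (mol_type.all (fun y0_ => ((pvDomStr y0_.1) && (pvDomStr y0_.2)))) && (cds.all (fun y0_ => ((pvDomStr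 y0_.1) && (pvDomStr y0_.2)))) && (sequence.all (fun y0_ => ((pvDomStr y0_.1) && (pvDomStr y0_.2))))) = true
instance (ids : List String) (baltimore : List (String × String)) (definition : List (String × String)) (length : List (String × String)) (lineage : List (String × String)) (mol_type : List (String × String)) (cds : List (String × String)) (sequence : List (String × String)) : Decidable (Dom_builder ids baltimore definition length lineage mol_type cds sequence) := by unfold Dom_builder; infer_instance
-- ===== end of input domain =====

-- B replaces A's seven field-wide passes (each rescanning all of json_dict's keys per field entry)
-- by ONE pass over ids that assembles each record completely; objective: faster (measured).

-- ===== PORT A =====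
-- one of A's seven passes: 'for id in field: for key in json_dict: if id == key: json_dict[id][name] = field[id]'
def builderPass (field : List (String × String)) (name : String)
    (d : PySem.Dict String (PySem.Dict String String)) : PySem.Dict String (PySem.Dict String String) :=
  field.foldl (fun d p =>
    d.keys.foldl (fun d' key =>
      if p.1 = key then
        d'.modify p.1 PySem.Dict.empty
          (fun inner => inner.insert name ((PySem.Dict.mk field).getD p.1 ""))
      else d') d) d

def builder (ids : List String) (baltimore : List (String × String)) (definition : List (String × String)) (length : List (String × String)) (lineage : List (String × String)) (mol_type : List (String × String)) (cds : List (String × String)) (sequence : List (String × String)) : List (String × List (String × String)) :=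
  let d0 := ids.foldl (fun d id => d.insert id PySem.Dict.empty) PySem.Dict.empty
  let d1 := builderPass baltimore "baltimore_group" d0
  let d2 := builderPass definition "definition" d1
  let d3 := builderPass length "length" d2
  let d4 := builderPass lineage "lineage" d3
  let d5 := builderPass mol_type "mol_type" d4
  let d6 := builderPass cds "CDS" d5
  let d7 := builderPass sequence "sequence" d6
  d7.items.map (fun p => (p.1, p.2.items))

-- ===== PORT B =====
-- one conditional field of B's record: "if id in field: entry[name] = field[id]"
def entryStep (field : List (String × String)) (name : String) (id : String)
    (e : PySem.Dict String String) : PySem.Dict String String :=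
  match (PySem.Dict.mk field).get? id with
  | some v => e.insert name v
  | none => e

-- B's per-id record, fields added in A's pass order
def entryB (baltimore definition length lineage mol_type cds sequence : List (String × String))
    (id : String) : PySem.Dict String String :=
  entryStep sequence "sequence" id
    (entryStep cds "CDS" id
      (entryStep mol_type "mol_type" id
        (entryStep lineage "lineage" id
          (entryStep length "length" id
            (entryStep definition "definition" id
              (entryStep baltimore "baltimore_group" id PySem.Dict.empty))))))

def builder_alt (ids : List String) (baltimore : List (String × String)) (definition : List (String × String)) (length : List (String × String)) (lineage : List (String × String)) (mol_type : List (String × String)) (cds : List (String × String)) (sequence : List (String × String)) : List (String × List (String × String)) :=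
  (ids.foldl (fun d id =>
      d.insert id (entryB baltimore definition length lineage mol_type cds sequence id))
    PySem.Dict.empty).items.map (fun p => (p.1, p.2.items))

-- ===== PRECONDITION & SPEC =====
def Spec_builder (ids : List String) (baltimore : List (String × String)) (definition : List (String × String)) (length : List (String × String)) (lineage : List (String × String)) (mol_type : List (String × String)) (cds : List (String × String)) (sequence : List (String × String)) (out : List (String × List (String × String))) : Prop := out = builder_alt ids baltimore definition length lineage mol_type cds sequence
instance (ids : List String) (baltimore : List (String × String)) (definition : List (String × String)) (length : List (String × String)) (lineage : List (String × String)) (mol_type : List (String × String)) (cds : List (String × String)) (sequence : List (String × String)) (out : List (String × List (String × String))) : Decidable (Spec_builder ids baltimore definition length lineage mol_type cds sequence out) := by unfold Spec_builder; infer_instance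

-- ===== CLAIM (what is proved, stated in full; the proofs are below) =====
def Claim_equal_builder : Prop := ∀ (ids : List String) (baltimore : List (String × String)) (definition : List (String × String)) (length : List (String × String)) (lineage : List (String × String)) (mol_type : List (String × String)) (cds : List (String × String)) (sequence : List (String × String)), Dom_builder ids baltimore definition length lineage mol_type cds sequence → Spec_builder ids baltimore definition length lineage mol_type cds sequence (builder ids baltimore definition length lineage mol_type cds sequence)

-- ===== LEMMAS AND PROOFS =====

-- the inner 'for key in json_dict' scan does nothing when the field id is not a key
theorem innerScan_no_match (ks : List String) (d : PySem.Dict String (PySem.Dict String String))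
    (x : String) (f : PySem.Dict String String → PySem.Dict String String) (hx : x ∉ ks) :
    ks.foldl (fun d' key => if x = key then d'.modify x PySem.Dict.empty f else d') d = d := by
  induction ks generalizing d with
  | nil => rfl
  | cons h t ih =>
    simp only [List.mem_cons, not_or] at hx
    simp only [List.foldl_cons, if_neg hx.1]
    exact ih d hx.2

-- with distinct keys, the inner scan is a single conditional modify
theorem innerScan_eq (ks : List String) (d : PySem.Dict String (PySem.Dict String String))
    (x : String) (f : PySem.Dict String String → PySem.Dict String String) (hnd : ks.Nodup) :
    ks.foldl (fun d' key => if x = key then d'.modify x PySem.Dict.empty f else d') d =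
      if x ∈ ks then d.modify x PySem.Dict.empty f else d := by
  induction ks generalizing d with
  | nil => simp
  | cons h t ih =>
    rcases List.nodup_cons.mp hnd with ⟨hh, ht⟩
    by_cases hx : x = h
    · subst hx
      simp only [List.foldl_cons, List.mem_cons, true_or, if_true]
      exact innerScan_no_match t _ x f hh
    · simp only [List.foldl_cons, if_neg hx, ih _ ht, List.mem_cons]
      simp [hx]
  
theorem keys_modify' (d : PySem.Dict String (PySem.Dict String String)) (k : String)
    (d0 : PySem.Dict String String) (f : PySem.Dict String String → PySem.Dict String String)
    (hk : k ∈ d.keys) : (d.modify k d0 f).keys = d.keys := by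
  rw [PySem.Dict.keys_modify]
  exact PySem.Dict.keys_insert_of_contains _ _ (by simpa [PySem.Dict.contains_iff_mem_keys] using hk)

-- a dict lookup on the raw association list: none exactly when the key is absent
theorem mkGet_none (l : List (String × String)) (k : String) :
    (PySem.Dict.mk l).get? k = none ↔ k ∉ l.map Prod.fst := by
  induction l with
  | nil => simp [PySem.Dict.get?]
  | cons p t ih =>
    rw [PySem.Dict.get?_mk_cons]
    by_cases h : p.1 = k
    · simp [h]
    · simpa [h, Ne.symm h] using ih

-- inserting the same binding twice is inserting it once
theorem insert_idem (e : PySem.Dict String String) (n v : String) :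
    (e.insert n v).insert n v = e.insert n v := by
  apply PySem.Dict.ext
  rw [PySem.Dict.items_insert_of_contains _ _ (PySem.Dict.contains_insert_self _ _ _)]
  have hfix : ∀ p ∈ (e.insert n v).items,
      (if (p.1 == n) = true then (n, v) else p) = p := by
    intro p hp
    rcases (PySem.Dict.mem_items_insert _ _ _ _).mp hp with h1 | ⟨_, h2⟩
    · simp [h1]
    · simp [h2]
  rw [List.map_congr_left hfix]; simp

-- effect of one of A's passes on every stored record (keys unchanged)
theorem builderPass_spec (field : List (String × String)) (name : String) :
    ∀ (rest : List (String × String)) (d : PySem.Dict String (PySem.Dict String String)),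
      d.keys.Nodup →
      (rest.foldl (fun d p =>
        d.keys.foldl (fun d' key =>
          if p.1 = key then
            d'.modify p.1 PySem.Dict.empty
              (fun inner => inner.insert name ((PySem.Dict.mk field).getD p.1 ""))
          else d') d) d).keys = d.keys ∧
      ∀ k, (rest.foldl (fun d p =>
        d.keys.foldl (fun d' key =>
          if p.1 = key then
            d'.modify p.1 PySem.Dict.empty
              (fun inner => inner.insert name ((PySem.Dict.mk field).getD p.1 ""))
          else d') d) d).getD k PySem.Dict.empty =
        if k ∈ rest.map Prod.fst ∧ k ∈ d.keys then
          (d.getD k PySem.Dict.empty).insert name ((PySem.Dict.mk field).getD k "")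
        else d.getD k PySem.Dict.empty := by
  intro rest
  induction rest with
  | nil => intro d hnd; simp
  | cons p t ih =>
    intro d hnd
    simp only [List.foldl_cons]
    rw [innerScan_eq d.keys d p.1 _ hnd]
    by_cases hp : p.1 ∈ d.keys
    · rw [if_pos hp]
      have hkeys : (d.modify p.1 PySem.Dict.empty
          (fun inner => inner.insert name ((PySem.Dict.mk field).getD p.1 ""))).keys = d.keys :=
        keys_modify' d p.1 _ _ hp
      obtain ⟨ihk, ihg⟩ := ih (d.modify p.1 PySem.Dict.empty _) (by rw [hkeys]; exact hnd)
      constructor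
      · rw [ihk, hkeys]
      · intro k
        rw [ihg k, hkeys]
        have hmod : (d.modify p.1 PySem.Dict.empty
            (fun inner => inner.insert name ((PySem.Dict.mk field).getD p.1 ""))).getD k PySem.Dict.empty
            = if k = p.1 then
                (d.getD p.1 PySem.Dict.empty).insert name ((PySem.Dict.mk field).getD p.1 "")
              else d.getD k PySem.Dict.empty :=
          PySem.Dict.getD_modify d p.1 k PySem.Dict.empty _
        by_cases hk : k = p.1
        · subst hk
          rw [hmod, if_pos rfl]
          by_cases hkt : p.1 ∈ t.map Prod.fst
          · rw [if_pos ⟨hkt, hp⟩, insert_idem, if_pos ⟨by simp, hp⟩]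
          · rw [if_neg (fun hc => hkt hc.1), if_pos ⟨by simp, hp⟩]
        · rw [hmod, if_neg hk]
          by_cases hkt : k ∈ t.map Prod.fst ∧ k ∈ d.keys
          · rw [if_pos hkt, if_pos ⟨by simp [hkt.1], hkt.2⟩]
          · rw [if_neg hkt, if_neg ?_]
            rintro ⟨hmem, hkey⟩
            simp only [List.map_cons, List.mem_cons] at hmem
            rcases hmem with h1 | h1
            · exact hk h1
            · exact hkt ⟨h1, hkey⟩
    · rw [if_neg hp]
      obtain ⟨ihk, ihg⟩ := ih d hnd
      refine ⟨ihk, fun k => ?_⟩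
      rw [ihg k]
      by_cases hkt : k ∈ t.map Prod.fst ∧ k ∈ d.keys
      · rw [if_pos hkt, if_pos ⟨by simp [hkt.1], hkt.2⟩]
      · rw [if_neg hkt, if_neg ?_]
        rintro ⟨hmem, hkey⟩
        simp only [List.map_cons, List.mem_cons] at hmem
        rcases hmem with h1 | h1
        · exact hp (h1 ▸ hkey)
        · exact hkt ⟨h1, hkey⟩

-- A's initialisation: every record starts empty
theorem init_getD (l : List String) :
    ∀ (d : PySem.Dict String (PySem.Dict String String)),
      (∀ k, d.getD k PySem.Dict.empty = PySem.Dict.empty) →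
      ∀ k, (l.foldl (fun d id => d.insert id PySem.Dict.empty) d).getD k PySem.Dict.empty = PySem.Dict.empty := by
  induction l with
  | nil => intro d h k; exact h k
  | cons x t ih =>
    intro d h k
    refine ih _ (fun k' => ?_) k
    rw [PySem.Dict.getD_insert]
    split <;> [rfl; exact h k']

-- B's single pass: the stored record of id is entryB id
theorem altFold_getD (g : String → PySem.Dict String String) (l : List String) :
    ∀ (d : PySem.Dict String (PySem.Dict String String)) (k : String),
      (l.foldl (fun d x => d.insert x (g x)) d).getD k PySem.Dict.empty =
        if k ∈ l then g k else d.getD k PySem.Dict.empty := by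
  induction l with
  | nil => intro d k; simp
  | cons x t ih =>
    intro d k
    simp only [List.foldl_cons, ih, List.mem_cons]
    by_cases hkt : k ∈ t
    · simp [hkt]
    · rw [PySem.Dict.getD_insert]
      by_cases hkx : k = x <;> simp [hkx, hkt]

-- a present key's get? is some of its getD
theorem get?_eq_some_getD {ν : Type} (d : PySem.Dict String ν) (k : String) (d0 : ν)
    (hmem : k ∈ d.keys) : d.get? k = some (d.getD k d0) := by
  cases hg : d.get? k with
  | none => exact absurd hmem ((PySem.Dict.get?_eq_none_iff_not_mem_keys d k).mp hg)
  | some v => rw [PySem.Dict.getD_of_get?_eq_some d d0 hg]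

-- two dicts with equal (nodup) key lists and equal lookups have equal item lists
theorem items_eq_of_keys_get? {ν : Type} (d d' : PySem.Dict String ν)
    (hk : d.keys = d'.keys) (hnd : d.keys.Nodup) (hg : ∀ k, d.get? k = d'.get? k) :
    d.items = d'.items := by
  have hlen : d.items.length = d'.items.length := by
    have := congrArg List.length hk
    simpa [PySem.Dict.keys] using this
  apply List.ext_getElem hlen
  intro i h1 h2
  have hk1 : d.items[i].1 = d'.items[i].1 := by
    have := congrArg (fun l => l[i]?) hk
    simpa [PySem.Dict.keys, List.getElem?_map, List.getElem?_eq_getElem, h1, h2] using this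
  have hv1 : d.get? d.items[i].1 = some d.items[i].2 :=
    PySem.Dict.get?_of_mem_items d (by simp) hnd
  have hv2 : d'.get? d'.items[i].1 = some d'.items[i].2 :=
    PySem.Dict.get?_of_mem_items d' (by simp) (hk ▸ hnd)
  have : some d.items[i].2 = some d'.items[i].2 := by
    rw [← hv1, hg, hk1, hv2]
  exact Prod.ext hk1 (Option.some.injEq _ _ ▸ this)

-- the conditional insert of A's pass equals B's entryStep
theorem step_eq (field : List (String × String)) (name : String) (k : String)
    (e : PySem.Dict String String) :
    (if k ∈ field.map Prod.fst then e.insert name ((PySem.Dict.mk field).getD k "") else e) =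
      entryStep field name k e := by
  unfold entryStep
  cases hg : (PySem.Dict.mk field).get? k with
  | none => rw [if_neg ((mkGet_none field k).mp hg)]
  | some v =>
    rw [if_pos (by by_contra h; rw [(mkGet_none field k).mpr h] at hg; cases hg),
      PySem.Dict.getD_of_get?_eq_some _ _ hg]

-- the pass lemma restated for builderPass itself
theorem pass_char (field : List (String × String)) (name : String)
    (d : PySem.Dict String (PySem.Dict String String)) (hnd : d.keys.Nodup) :
    (builderPass field name d).keys = d.keys ∧
    ∀ k, (builderPass field name d).getD k PySem.Dict.empty =
      if k ∈ field.map Prod.fst ∧ k ∈ d.keys then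
        (d.getD k PySem.Dict.empty).insert name ((PySem.Dict.mk field).getD k "")
      else d.getD k PySem.Dict.empty := by
  unfold builderPass
  exact builderPass_spec field name field d hnd

-- ===== VERDICT (by name: the statement is the Claim_ definition above) =====
theorem builder_spec : Claim_equal_builder := by
  intro ids baltimore definition length lineage mol_type cds sequence _
  unfold Spec_builder
  have hb : builder ids baltimore definition length lineage mol_type cds sequence
      = (builderPass sequence "sequence" (builderPass cds "CDS" (builderPass mol_type "mol_type"
          (builderPass lineage "lineage" (builderPass length "length" (builderPass definition "definition"
            (builderPass baltimore "baltimore_group"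
              (ids.foldl (fun d id => d.insert id PySem.Dict.empty)
                PySem.Dict.empty)))))))).items.map (fun p => (p.1, p.2.items)) := rfl
  have halt : builder_alt ids baltimore definition length lineage mol_type cds sequence
      = (ids.foldl (fun d id =>
            d.insert id (entryB baltimore definition length lineage mol_type cds sequence id))
          PySem.Dict.empty).items.map (fun p => (p.1, p.2.items)) := rfl
  rw [hb, halt]
  set d0 : PySem.Dict String (PySem.Dict String String) :=
    ids.foldl (fun d id => d.insert id PySem.Dict.empty) PySem.Dict.empty with hd0
  set dB : PySem.Dict String (PySem.Dict String String) :=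
    ids.foldl (fun d id =>
      d.insert id (entryB baltimore definition length lineage mol_type cds sequence id))
      PySem.Dict.empty with hdB
  have hk0 : d0.keys = PySem.Set.ofList ids := by
    rw [hd0, PySem.Dict.keys_foldl_insert]; rfl
  have hnd0 : d0.keys.Nodup := by rw [hk0]; exact PySem.Set.nodup_ofList ids
  have hg0 : ∀ k, d0.getD k PySem.Dict.empty = PySem.Dict.empty := by
    rw [hd0]
    exact init_getD ids PySem.Dict.empty (fun k => PySem.Dict.getD_empty k _)
  have hkB : dB.keys = PySem.Set.ofList ids := by
    rw [hdB, PySem.Dict.keys_foldl_insert]; rfl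
  obtain ⟨k1, g1⟩ := pass_char baltimore "baltimore_group" d0 hnd0
  obtain ⟨k2, g2⟩ := pass_char definition "definition" _ (k1 ▸ hnd0)
  obtain ⟨k3, g3⟩ := pass_char length "length" _ (k2 ▸ k1 ▸ hnd0)
  obtain ⟨k4, g4⟩ := pass_char lineage "lineage" _ (k3 ▸ k2 ▸ k1 ▸ hnd0)
  obtain ⟨k5, g5⟩ := pass_char mol_type "mol_type" _ (k4 ▸ k3 ▸ k2 ▸ k1 ▸ hnd0)
  obtain ⟨k6, g6⟩ := pass_char cds "CDS" _ (k5 ▸ k4 ▸ k3 ▸ k2 ▸ k1 ▸ hnd0)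
  obtain ⟨k7, g7⟩ := pass_char sequence "sequence" _ (k6 ▸ k5 ▸ k4 ▸ k3 ▸ k2 ▸ k1 ▸ hnd0)
  have hk7 : (builderPass sequence "sequence" (builderPass cds "CDS" (builderPass mol_type "mol_type"
      (builderPass lineage "lineage" (builderPass length "length" (builderPass definition "definition"
        (builderPass baltimore "baltimore_group" d0))))))).keys = PySem.Set.ofList ids := by
    rw [k7, k6, k5, k4, k3, k2, k1, hk0]
  refine congrArg (List.map _) (items_eq_of_keys_get? _ _ (by rw [hk7, hkB]) (by rw [hk7]; exact PySem.Set.nodup_ofList ids) ?_)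
  intro k
  by_cases hmem : k ∈ ids
  · have hmem0 : k ∈ d0.keys := by rw [hk0]; exact (PySem.Set.mem_ofList ids k).mpr hmem
    rw [get?_eq_some_getD _ k PySem.Dict.empty (by rw [hk7]; exact (PySem.Set.mem_ofList ids k).mpr hmem),
        get?_eq_some_getD _ k PySem.Dict.empty (by rw [hkB]; exact (PySem.Set.mem_ofList ids k).mpr hmem)]
    rw [g7 k, k6, k5, k4, k3, k2, k1, g6 k, k5, k4, k3, k2, k1, g5 k, k4, k3, k2, k1,
        g4 k, k3, k2, k1, g3 k, k2, k1, g2 k, k1, g1 k, hg0 k]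
    have haltg : dB.getD k PySem.Dict.empty
        = entryB baltimore definition length lineage mol_type cds sequence k := by
      rw [hdB, altFold_getD, if_pos hmem]
    rw [haltg]
    simp only [hmem0, and_true]
    rw [step_eq baltimore, step_eq definition, step_eq length, step_eq lineage,
        step_eq mol_type, step_eq cds, step_eq sequence]
    rfl
  · rw [(PySem.Dict.get?_eq_none_iff_not_mem_keys _ k).mpr
          (by rw [hk7]; exact fun h => hmem ((PySem.Set.mem_ofList ids k).mp h)),
        (PySem.Dict.get?_eq_none_iff_not_mem_keys _ k).mpr
          (by rw [hkB]; exact fun h => hmem ((PySem.Set.mem_ofList ids k).mp h))]
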